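-- pv_equiv track=rewrite | github.com/uroborus2s/sinan-captcha | packages/sinan-captcha/src/inference/query_splitter.py | _bridge_small_gaps
-- ===== SOURCE A (Python) =====
-- MAX_BRIDGE_GAP_PX = 2
--
-- def _bridge_small_gaps(active_columns: list[bool]) -> list[bool]:
--     bridged = list(active_columns)
--     index = 0
--     total = len(active_columns)
--     while index < total:
--         if active_columns[index]:
--             index += 1
--             continue
--         gap_start = index
--         while index < total and not active_columns[index]:
--             index += 1
--         gap_end = index
--         gap_length = gap_end - gap_start
--         if (
--             gap_start > 0
--             and gap_end < total
--             and active_columns[gap_start - 1]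
--             and active_columns[gap_end]
--             and gap_length <= MAX_BRIDGE_GAP_PX
--         ):
--             for fill_index in range(gap_start, gap_end):
--                 bridged[fill_index] = True
--     return bridged
-- ===== SOURCE B (Python) =====
-- MAX_BRIDGE_GAP_PX = 2
--
-- def _bridge_small_gaps(active_columns: list[bool]) -> list[bool]:
--     # Closed-form stencil: a column is active in the output iff it is active,
--     # or it sits in a 1- or 2-wide inactive stretch flanked by active columns.
--     n = len(active_columns)
--
--     def on(i):
--         return 0 <= i < n and active_columns[i]
--
--     return [
--         on(i)
--         or (on(i - 1) and (on(i + 1) or on(i + 2)))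
--         or (on(i - 2) and on(i + 1))
--         for i in range(n)
--     ]
-- ===== Notes on version B (the rewrite author's own statement) =====
-- stated objective: simpler
-- what changed: Replaced the imperative gap-scanning while-loop with in-place fills by a single closed-form stencil: each output bit is computed directly from a +-2 window of neighbours in one list comprehension.
import Mathlib
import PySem

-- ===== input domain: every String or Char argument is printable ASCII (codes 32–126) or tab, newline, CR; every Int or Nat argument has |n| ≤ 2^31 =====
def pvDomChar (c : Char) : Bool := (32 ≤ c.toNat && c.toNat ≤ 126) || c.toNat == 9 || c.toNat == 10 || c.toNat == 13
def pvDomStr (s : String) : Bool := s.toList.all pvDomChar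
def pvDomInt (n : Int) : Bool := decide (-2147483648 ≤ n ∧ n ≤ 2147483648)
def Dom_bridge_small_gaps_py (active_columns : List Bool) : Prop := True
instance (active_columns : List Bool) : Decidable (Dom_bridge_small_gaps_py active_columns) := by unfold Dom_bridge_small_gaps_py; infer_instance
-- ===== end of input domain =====

-- B replaces A's gap-scanning while-loop with in-place fills by a one-pass ±2-window stencil (objective: simpler).

-- ===== PORT A =====
-- inner while: advance index while index < total and not active_columns[index]
def scanGapA (a : List Bool) (total index : Nat) : Nat :=
  if h : index < total ∧ a.getD index false = false then scanGapA a total (index + 1) else index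
termination_by total - index
decreasing_by omega

-- termination helpers for the outer loop (cited by loopA's decreasing_by)
theorem scanGapA_ge (a : List Bool) (total : Nat) : ∀ fuel index, total - index ≤ fuel → index ≤ scanGapA a total index := by
  intro fuel
  induction fuel with
  | zero =>
      intro index hf
      rw [scanGapA]
      split
      · rename_i h; exact absurd h.1 (by omega)
      · exact le_refl _
  | succ n ih =>
      intro index hf
      rw [scanGapA]
      split
      · have := ih (index + 1) (by omega)
        omega
      · exact le_refl _

theorem scanGapA_gt (a : List Bool) (total index : Nat) (h1 : index < total)
    (h2 : a.getD index false = false) : index < scanGapA a total index := by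
  rw [scanGapA, dif_pos ⟨h1, h2⟩]
  have := scanGapA_ge a total (total - (index + 1)) (index + 1) (le_refl _)
  omega

-- for fill_index in range(gap_start, gap_end): bridged[fill_index] = True
def fillA (bridged : List Bool) (gap_start gap_end : Nat) : List Bool :=
  (List.range' gap_start (gap_end - gap_start)).foldl (fun b j => b.set j true) bridged

-- outer while loop of A (gap_start = index, gap_end = scanGapA a total index)
def loopA (a : List Bool) (total index : Nat) (bridged : List Bool) : List Bool :=
  if h : index < total then
    if hA : a.getD index false = true then loopA a total (index + 1) bridged
    else
      loopA a total (scanGapA a total index)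
        (if 0 < index ∧ scanGapA a total index < total ∧ a.getD (index - 1) false = true ∧
            a.getD (scanGapA a total index) false = true ∧ scanGapA a total index - index ≤ 2 then
          fillA bridged index (scanGapA a total index)
        else bridged)
  else bridged
termination_by total - index
decreasing_by
  · omega
  · have := scanGapA_gt a total index h (by simpa using hA)
    omega

def bridge_small_gaps_py (active_columns : List Bool) : List Bool :=
  loopA active_columns active_columns.length 0 active_columns

-- ===== PORT B =====
-- on(i): 0 <= i < n and active_columns[i]
def pyOn (a : List Bool) (i : Int) : Bool := decide (0 ≤ i) && a.getD i.toNat false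

def bridge_small_gaps_py_alt (active_columns : List Bool) : List Bool :=
  (List.range active_columns.length).map (fun (i : Nat) =>
    pyOn active_columns (i : Int) ||
    (pyOn active_columns ((i : Int) - 1) && (pyOn active_columns ((i : Int) + 1) || pyOn active_columns ((i : Int) + 2))) ||
    (pyOn active_columns ((i : Int) - 2) && pyOn active_columns ((i : Int) + 1)))

-- ===== PRECONDITION & SPEC =====
def Spec_bridge_small_gaps_py (active_columns : List Bool) (out : List Bool) : Prop := out = bridge_small_gaps_py_alt active_columns
instance (active_columns : List Bool) (out : List Bool) : Decidable (Spec_bridge_small_gaps_py active_columns out) := by unfold Spec_bridge_small_gaps_py; infer_instance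

-- ===== CLAIM (what is proved, stated in full; the proofs are below) =====
def Claim_equal_bridge_small_gaps_py : Prop := ∀ (active_columns : List Bool), Dom_bridge_small_gaps_py active_columns → Spec_bridge_small_gaps_py active_columns (bridge_small_gaps_py active_columns)

-- ===== LEMMAS AND PROOFS =====

-- the stencil value of B at index j
def W (a : List Bool) (j : Nat) : Bool :=
  pyOn a (j : Int) ||
  (pyOn a ((j : Int) - 1) && (pyOn a ((j : Int) + 1) || pyOn a ((j : Int) + 2))) ||
  (pyOn a ((j : Int) - 2) && pyOn a ((j : Int) + 1))

theorem alt_eq_map_W (a : List Bool) : bridge_small_gaps_py_alt a = (List.range a.length).map (W a) := by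
  unfold bridge_small_gaps_py_alt W
  rfl

theorem pyOn_natCast (a : List Bool) (k : Nat) : pyOn a (k : Int) = a.getD k false := by
  simp [pyOn]

theorem pyOn_neg (a : List Bool) (i : Int) (h : i < 0) : pyOn a i = false := by
  simp [pyOn]; omega

theorem getD_ge (a : List Bool) (k : Nat) (h : a.length ≤ k) : a.getD k false = false := by
  simp [List.getD_eq_getElem?_getD, List.getElem?_eq_none h]

theorem pyOn_ge (a : List Bool) (i : Int) (h : (a.length : Int) ≤ i) : pyOn a i = false := by
  rcases le_or_gt 0 i with h0 | h0
  · unfold pyOn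
    rw [getD_ge a i.toNat (by omega)]
    simp
  · exact pyOn_neg a i (by omega)

theorem W_out (a : List Bool) (j : Nat) (h : a.length ≤ j) : W a j = false := by
  unfold W
  rw [pyOn_natCast, getD_ge a j h, pyOn_ge a ((j:Int)+1) (by omega), pyOn_ge a ((j:Int)+2) (by omega)]
  simp

theorem W_active (a : List Bool) (j : Nat) (h : a.getD j false = true) : W a j = true := by
  unfold W; rw [pyOn_natCast, h]; simp

-- a column inside a gap that A does NOT fill has stencil value false
theorem W_gap_false (a : List Bool) (s e j : Nat)
    (hse : s ≤ j) (hje : j < e) (het : e ≤ a.length)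
    (hgap : ∀ k, s ≤ k → k < e → a.getD k false = false)
    (hleft : s = 0 ∨ a.getD (s - 1) false = true)
    (hright : e = a.length ∨ a.getD e false = true)
    (hnc : ¬(0 < s ∧ e < a.length ∧ a.getD (s - 1) false = true ∧
              a.getD e false = true ∧ e - s ≤ 2)) :
    W a j = false := by
  -- key shape fact: the gap is a leading gap, a trailing gap, or long (≥ 3)
  have hK : s = 0 ∨ e = a.length ∨ 3 ≤ e - s := by
    by_cases hs : s = 0
    · exact Or.inl hs
    · by_cases he : e = a.length
      · exact Or.inr (Or.inl he)
      · have hl : a.getD (s - 1) false = true := hleft.resolve_left hs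
        have hr : a.getD e false = true := hright.resolve_left he
        refine Or.inr (Or.inr ?_)
        by_contra hlen
        exact hnc ⟨by omega, by omega, hl, hr, by omega⟩
  -- pyOn is false at Nat positions inside the gap or past the end
  have hval : ∀ k : Nat, (s ≤ k ∧ k < e) ∨ a.length ≤ k → pyOn a (k : Int) = false := by
    intro k hk
    rw [pyOn_natCast]
    rcases hk with ⟨h1, h2⟩ | h1
    · exact hgap k h1 h2
    · exact getD_ge a k h1
  unfold W
  have h0 : pyOn a (j : Int) = false := hval j (Or.inl ⟨hse, hje⟩)
  have h1 : (pyOn a ((j:Int) - 1) && (pyOn a ((j:Int) + 1) || pyOn a ((j:Int) + 2))) = false := by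
    by_cases hjs : s < j
    · rw [show ((j:Int) - 1) = ((j - 1 : Nat) : Int) by omega,
          hval (j-1) (Or.inl ⟨by omega, by omega⟩)]
      simp
    · have hj : j = s := by omega
      rcases hK with hs0 | hetot | hlong
      · rw [pyOn_neg a ((j:Int) - 1) (by omega)]; simp
      · rw [show ((j:Int) + 1) = ((j + 1 : Nat) : Int) by omega,
            show ((j:Int) + 2) = ((j + 2 : Nat) : Int) by omega,
            hval (j+1) (by omega), hval (j+2) (by omega)]
        simp
      · rw [show ((j:Int) + 1) = ((j + 1 : Nat) : Int) by omega,
            show ((j:Int) + 2) = ((j + 2 : Nat) : Int) by omega,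
            hval (j+1) (Or.inl ⟨by omega, by omega⟩), hval (j+2) (Or.inl ⟨by omega, by omega⟩)]
        simp
  have h2 : (pyOn a ((j:Int) - 2) && pyOn a ((j:Int) + 1)) = false := by
    by_cases hj1 : j + 1 < e
    · rw [show ((j:Int) + 1) = ((j + 1 : Nat) : Int) by omega,
          hval (j+1) (Or.inl ⟨by omega, hj1⟩)]
      simp
    · have hje' : j + 1 = e := by omega
      rcases hK with hs0 | hetot | hlong
      · by_cases hneg : (j:Int) - 2 < 0
        · rw [pyOn_neg a _ hneg]; simp
        · rw [show ((j:Int) - 2) = ((j - 2 : Nat) : Int) by omega,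
              hval (j-2) (Or.inl ⟨by omega, by omega⟩)]
          simp
      · rw [show ((j:Int) + 1) = ((j + 1 : Nat) : Int) by omega,
            hval (j+1) (Or.inr (by omega))]
        simp
      · rw [show ((j:Int) - 2) = ((j - 2 : Nat) : Int) by omega,
            hval (j-2) (Or.inl ⟨by omega, by omega⟩)]
        simp
  rw [h0, h1, h2]; rfl

-- a column inside a gap that A DOES fill has stencil value true
theorem W_gap_true (a : List Bool) (s e j : Nat)
    (hse : s ≤ j) (hje : j < e)
    (hs : 0 < s) (he : e < a.length)
    (hl : a.getD (s - 1) false = true) (hr : a.getD e false = true)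
    (hlen : e - s ≤ 2) :
    W a j = true := by
  unfold W
  by_cases hj : j = s
  · subst hj
    rw [show ((j:Int) - 1) = ((j - 1 : Nat) : Int) by omega, pyOn_natCast a (j - 1), hl]
    by_cases h1 : j + 1 = e
    · rw [show ((j:Int) + 1) = ((e : Nat) : Int) by omega, pyOn_natCast a e, hr]; simp
    · have h2 : j + 2 = e := by omega
      rw [show ((j:Int) + 2) = ((e : Nat) : Int) by omega, pyOn_natCast a e, hr]; simp
  · -- j = s + 1 and e = s + 2: middle column of a 2-gap
    have hj' : j = s + 1 ∧ e = s + 2 := by omega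
    rw [show ((j:Int) - 2) = ((s - 1 : Nat) : Int) by omega,
        show ((j:Int) + 1) = ((e : Nat) : Int) by omega,
        pyOn_natCast a (s - 1), pyOn_natCast a e, hl, hr]
    simp

-- List.set and getD
theorem getD_set_bool (b : List Bool) (i j : Nat) (v : Bool) :
    (b.set i v).getD j false = if i = j ∧ j < b.length then v else b.getD j false := by
  by_cases hij : i = j
  · subst hij
    by_cases hl : i < b.length
    · simp [List.getD_eq_getElem?_getD, hl]
    · have hge : b.length ≤ i := by omega
      simp [List.getD_eq_getElem?_getD, hl]
  · simp [List.getD_eq_getElem?_getD, hij]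

-- the exit of the inner while loop: bounds, all-inactive, stop condition
theorem scanGapA_spec (a : List Bool) : ∀ fuel index, a.length - index ≤ fuel →
    index ≤ scanGapA a a.length index ∧ scanGapA a a.length index ≤ max index a.length ∧
    (∀ k, index ≤ k → k < scanGapA a a.length index → a.getD k false = false) ∧
    (scanGapA a a.length index < a.length → a.getD (scanGapA a a.length index) false = true) := by
  intro fuel
  induction fuel with
  | zero =>
      intro index hf
      rw [scanGapA]
      split
      · rename_i h; exact absurd h.1 (by omega)
      · rename_i h
        refine ⟨le_refl _, by omega, fun k hk1 hk2 => absurd hk2 (by omega), fun hlt => ?_⟩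
        rcases Decidable.not_and_iff_or_not.mp h with h' | h'
        · exact absurd hlt h'
        · simpa using h'
  | succ m ihm =>
      intro index hf
      rw [scanGapA]
      split
      · rename_i h
        obtain ⟨hm1, hm2, hm3, hm4⟩ := ihm (index + 1) (by omega)
        refine ⟨by omega, by omega, fun k hk1 hk2 => ?_, hm4⟩
        by_cases hk : k = index
        · subst hk; exact h.2
        · exact hm3 k (by omega) hk2
      · rename_i h
        refine ⟨le_refl _, by omega, fun k hk1 hk2 => absurd hk2 (by omega), fun hlt => ?_⟩
        rcases Decidable.not_and_iff_or_not.mp h with h' | h'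
        · exact absurd hlt h'
        · simpa using h'

-- main loop invariant: positions below index already carry the stencil value,
-- positions from index on are untouched, and index sits at 0, after an active
-- column, on an active column, or past the end
theorem loopA_main (a : List Bool) : ∀ (fuel index : Nat) (bridged : List Bool),
    a.length - index ≤ fuel →
    bridged.length = a.length →
    (index = 0 ∨ a.getD (index - 1) false = true ∨ a.getD index false = true ∨ a.length ≤ index) →
    (∀ j, index ≤ j → bridged.getD j false = a.getD j false) →
    (∀ j, j < index → bridged.getD j false = W a j) →
    (loopA a a.length index bridged).length = a.length ∧
    (∀ j, (loopA a a.length index bridged).getD j false = W a j) := by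
  intro fuel
  induction fuel with
  | zero =>
      intro index bridged hf hlen _ hpre hpost
      rw [loopA, dif_neg (by omega)]
      refine ⟨hlen, fun j => ?_⟩
      by_cases hj : j < index
      · exact hpost j hj
      · rw [getD_ge bridged j (by omega), W_out a j (by omega)]
  | succ n ih =>
      intro index bridged hf hlen hinv hpre hpost
      by_cases hidx : index < a.length
      · rw [loopA, dif_pos hidx]
        by_cases hA : a.getD index false = true
        · rw [dif_pos hA]
          refine ih (index + 1) bridged (by omega) hlen (Or.inr (Or.inl (by simpa using hA)))
            (fun j hj => hpre j (by omega)) (fun j hj => ?_)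
          by_cases hji : j < index
          · exact hpost j hji
          · have : j = index := by omega
            subst this
            rw [hpre j (le_refl _), hA, W_active a j hA]
        · rw [dif_neg hA]
          have hA' : a.getD index false = false := by simpa using hA
          obtain ⟨hge, hle, hgap, hend⟩ := scanGapA_spec a (a.length - index) index (le_refl _)
          set e := scanGapA a a.length index
          have hgt : index < e := scanGapA_gt a a.length index hidx hA'
          have hele : e ≤ a.length := by omega
          have hleft : index = 0 ∨ a.getD (index - 1) false = true := by
            rcases hinv with h | h | h | h
            · exact Or.inl h
            · exact Or.inr h
            · rw [hA'] at h; exact absurd h (by simp)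
            · omega
          have hright : e = a.length ∨ a.getD e false = true := by
            by_cases h : e < a.length
            · exact Or.inr (hend h)
            · exact Or.inl (by omega)
          by_cases hC : 0 < index ∧ e < a.length ∧ a.getD (index - 1) false = true ∧
              a.getD e false = true ∧ e - index ≤ 2
          · -- fillable gap: e - index ∈ {1, 2}
            rw [if_pos hC]
            obtain ⟨hC1, hC2, hC3, hC4, hC5⟩ := hC
            have hfill : ∀ j, (fillA bridged index e).getD j false =
                if index ≤ j ∧ j < e then true else bridged.getD j false := by
              intro j
              by_cases h1 : e = index + 1
              · unfold fillA
                rw [show e - index = 1 by omega]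
                simp only [List.range'_one, List.foldl_cons, List.foldl_nil]
                rw [getD_set_bool]
                split <;> split <;> (first | rfl | (exfalso; omega))
              · have h2 : e = index + 2 := by omega
                unfold fillA
                rw [show e - index = 2 by omega]
                show ((bridged.set index true).set (index + 1) true).getD j false = _
                rw [getD_set_bool, getD_set_bool]
                rw [show (bridged.set index true).length = bridged.length by simp]
                split <;> (try split) <;> (try split) <;> (first | rfl | (exfalso; omega))
            have hlenf : (fillA bridged index e).length = bridged.length := by
              unfold fillA
              by_cases h1 : e = index + 1
              · rw [show e - index = 1 by omega]; simp
              · rw [show e - index = 2 by omega]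
                show (((bridged.set index true).set (index + 1) true)).length = _
                simp
            refine ih e (fillA bridged index e) (by omega) (by rw [hlenf, hlen])
              (Or.inr (Or.inr (Or.inl hC4)))
              (fun j hj => by rw [hfill, if_neg (by omega)]; exact hpre j (by omega))
              (fun j hj => ?_)
            rw [hfill]
            by_cases hji : index ≤ j
            · rw [if_pos ⟨hji, hj⟩]
              exact (W_gap_true a index e j hji hj hC1 hC2 hC3 hC4 hC5).symm
            · rw [if_neg (by omega)]
              exact hpost j (by omega)
          · -- unfillable gap: bridged unchanged
            rw [if_neg hC]
            refine ih e bridged (by omega) hlen ?_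
              (fun j hj => hpre j (by omega)) (fun j hj => ?_)
            · rcases hright with h | h
              · exact Or.inr (Or.inr (Or.inr (by omega)))
              · exact Or.inr (Or.inr (Or.inl h))
            · by_cases hji : j < index
              · exact hpost j hji
              · have h1 : index ≤ j := by omega
                rw [hpre j h1, hgap j h1 hj]
                exact (W_gap_false a index e j h1 hj hele hgap hleft hright hC).symm
      · rw [loopA, dif_neg hidx]
        refine ⟨hlen, fun j => ?_⟩
        by_cases hj : j < index
        · exact hpost j hj
        · rw [getD_ge bridged j (by omega), W_out a j (by omega)]

-- ===== VERDICT (by name: the statement is the Claim_ definition above) =====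
theorem bridge_small_gaps_py_spec : Claim_equal_bridge_small_gaps_py := by
  intro a _
  unfold Spec_bridge_small_gaps_py bridge_small_gaps_py
  obtain ⟨hlen, hval⟩ := loopA_main a a.length 0 a (by omega) rfl (Or.inl rfl)
    (fun j _ => rfl) (fun j hj => absurd hj (by omega))
  rw [alt_eq_map_W]
  apply List.ext_getElem
  · rw [hlen]; simp
  · intro i h1 h2
    have hv := hval i
    rw [List.getD_eq_getElem?_getD, List.getElem?_eq_getElem h1, Option.getD_some] at hv
    rw [hv]
    simp
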